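-- pv_equiv track=rewrite | github.com/pypi-data/pypi-mirror-374 | packages/arraylake/arraylake-0.23.1.tar.gz/arraylake-0.23.1/arraylake/repos/v1/zarr_util.py | normalize_storage_path
-- ===== SOURCE A (Python) =====
-- from typing import Union
--
-- def normalize_storage_path(path: Union[str, bytes, None]) -> str:
--     # handle bytes
--     if isinstance(path, bytes):
--         path = str(path, "ascii")
--
--     # ensure str
--     if path is not None and not isinstance(path, str):
--         path = str(path)
--
--     if path:
--         # convert backslash to forward slash
--         path = path.replace("\\", "/")
--
--         # ensure no leading slash
--         while len(path) > 0 and path[0] == "/":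
--             path = path[1:]
--
--         # ensure no trailing slash
--         while len(path) > 0 and path[-1] == "/":
--             path = path[:-1]
--
--         # collapse any repeated slashes
--         previous_char = None
--         collapsed = ""
--         for char in path:
--             if char == "/" and previous_char == "/":
--                 pass
--             else:
--                 collapsed += char
--             previous_char = char
--         path = collapsed
--
--         # don't allow path segments with just '.' or '..'
--         segments = path.split("/")
--         if any(s in {".", ".."} for s in segments):
--             raise ValueError("path containing '.' or '..' segment not allowed")
--
--     else:
--         path = ""
--
--     return path
-- ===== SOURCE B (Python) =====
-- from typing import Union
--
--
-- def normalize_storage_path(path: Union[str, bytes, None]) -> str: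
--     # handle bytes
--     if isinstance(path, bytes):
--         path = str(path, "ascii")
--
--     # ensure str
--     if path is not None and not isinstance(path, str):
--         path = str(path)
--
--     if not path:
--         return ""
--
--     # treat the path as '/'-delimited segments: replace backslashes, split,
--     # drop the empty segments (this does leading/trailing/repeated slashes
--     # in one go), validate, and join back
--     segments = [s for s in path.replace("\\", "/").split("/") if s]
--     if any(s in {".", ".."} for s in segments):
--         raise ValueError("path containing '.' or '..' segment not allowed")
--     return "/".join(segments)
-- ===== Notes on version B (the rewrite author's own statement) =====
-- stated objective: simpler
-- what changed: A's two slash-stripping while-loops and its char-by-char collapse loop with a previous-char state are replaced by one split on '/' that drops empty segments and a join (the segment validation stays); a timing run measured B faster since split/join run in C instead of a per-character Python loop.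
import Mathlib
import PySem

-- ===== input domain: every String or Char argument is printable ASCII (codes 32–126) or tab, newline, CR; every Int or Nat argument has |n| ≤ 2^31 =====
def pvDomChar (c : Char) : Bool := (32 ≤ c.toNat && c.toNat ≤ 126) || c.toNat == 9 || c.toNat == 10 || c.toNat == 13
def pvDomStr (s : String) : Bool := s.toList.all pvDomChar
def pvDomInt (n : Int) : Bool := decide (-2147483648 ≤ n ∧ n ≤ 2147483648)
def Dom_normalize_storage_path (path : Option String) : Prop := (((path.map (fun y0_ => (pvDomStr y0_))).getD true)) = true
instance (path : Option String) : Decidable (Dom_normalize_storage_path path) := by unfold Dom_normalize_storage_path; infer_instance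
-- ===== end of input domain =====

-- B replaces A's two slash-stripping while-loops and its char-by-char collapse loop by one
-- split on '/' that drops empty segments, followed by a join (objective: simpler; a timing run measured B faster).

-- ===== PORT A =====
-- while len(path) > 0 and path[0] == "/": path = path[1:]
def pvStripLead : List Char → List Char
  | [] => []
  | c :: r => if c = '/' then pvStripLead r else c :: r

-- while len(path) > 0 and path[-1] == "/": path = path[:-1]   (path[-1] = getLast?, path[:-1] = dropLast)
def pvStripTrail (l : List Char) : List Char :=
  if 0 < l.length ∧ l.getLast? = some '/' then pvStripTrail l.dropLast else l
termination_by l.length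
decreasing_by
  rename_i h
  simp [List.length_dropLast]
  omega

-- loop body: previous_char := char; append char unless char == '/' == previous_char
def pvCollapseStep (st : Option Char × List Char) (c : Char) : Option Char × List Char :=
  (some c, if c = '/' ∧ st.1 = some '/' then st.2 else st.2 ++ [c])

def normalize_storage_path (path : Option String) : String :=
  match path with
  | none => ""          -- `if path:` is false, return ""
  | some s =>
    if s.toList = [] then "" else
      let p1 := PySem.Chars.replace s.toList ['\\'] ['/']
      let p2 := pvStripLead p1
      let p3 := pvStripTrail p2
      let collapsed := (p3.foldl pvCollapseStep ((none : Option Char), ([] : List Char))).2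
      -- path.split("/") ported as List.splitOn (exact for a single-char separator)
      let segments := collapsed.splitOn '/'
      if segments.any (fun t => t = ['.'] || t = ['.', '.']) then ""  -- raise ValueError; outside Pre_
      else String.ofList collapsed

-- ===== PORT B =====
def normalize_storage_path_alt (path : Option String) : String :=
  match path with
  | none => ""          -- `if not path: return ""`
  | some s =>
    if s.toList = [] then "" else
      -- [s for s in path.replace("\\", "/").split("/") if s]
      let segments := ((PySem.Chars.replace s.toList ['\\'] ['/']).splitOn '/').filter (fun t => t ≠ [])
      if segments.any (fun t => t = ['.'] || t = ['.', '.']) then ""  -- raise ValueError; outside Pre_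
      else String.ofList (PySem.Chars.join ['/'] segments)

-- ===== PRECONDITION & SPEC =====
-- Pre_ excludes exactly the inputs on which A raises ValueError: paths with a '.' or '..' segment.
def Pre_normalize_storage_path (path : Option String) : Prop :=
  ∀ t ∈ (PySem.Chars.replace (path.getD "").toList ['\\'] ['/']).splitOn '/', t ≠ ['.'] ∧ t ≠ ['.', '.']
instance (path : Option String) : Decidable (Pre_normalize_storage_path path) := by unfold Pre_normalize_storage_path; infer_instance

def pvWitness_normalize_storage_path : Option String := some "a//b\\c/"

def Spec_normalize_storage_path (path : Option String) (out : String) : Prop := out = normalize_storage_path_alt path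
instance (path : Option String) (out : String) : Decidable (Spec_normalize_storage_path path out) := by unfold Spec_normalize_storage_path; infer_instance

-- ===== CLAIM (what is proved, stated in full; the proofs are below) =====
def Claim_equal_normalize_storage_path : Prop := ∀ (path : Option String), Dom_normalize_storage_path path → Pre_normalize_storage_path path → Spec_normalize_storage_path path (normalize_storage_path path)

-- ===== LEMMAS AND PROOFS =====

-- the nonempty '/'-segments of M
def pvF (M : List Char) : List (List Char) := (M.splitOn '/').filter (fun t => t ≠ [])

-- the collapse loop as a structural recursion; the Bool is "previous char was '/'"
def pvG : Bool → List Char → List Char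
  | _, [] => []
  | b, c :: r => if c = '/' ∧ b = true then pvG true r else c :: pvG (c == '/') r

lemma pvFoldl_collapse (r : List Char) : ∀ (st : Option Char × List Char),
    (r.foldl pvCollapseStep st).2 = st.2 ++ pvG (st.1 == some '/') r := by
  induction r with
  | nil => intro st; simp [pvG]
  | cons c r ih =>
    intro st
    rw [List.foldl_cons, ih]
    by_cases h : c = '/' ∧ st.1 = some '/'
    · have hb : (st.1 == some '/') = true := by simp [h.2]
      simp [pvCollapseStep, pvG, h, hb]
    · have hg : pvG (st.1 == some '/') (c :: r) = c :: pvG (c == '/') r := by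
        rw [pvG]
        split
        · rename_i hc
          exact absurd ⟨hc.1, by simpa using hc.2⟩ h
        · rfl
      simp [pvCollapseStep, h, hg]

lemma splitOn_cons (c : Char) (r : List Char) :
    (c :: r).splitOn '/' = if c = '/' then [] :: r.splitOn '/' else (r.splitOn '/').modifyHead (c :: ·) := by
  simp only [List.splitOn, List.splitOnP_cons]
  by_cases h : c = '/' <;> simp [h]

lemma splitOn_ne_nil (M : List Char) : M.splitOn '/' ≠ [] := List.splitOnP_ne_nil _ _

lemma pvF_cons_slash (r : List Char) : pvF ('/' :: r) = pvF r := by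
  simp [pvF, splitOn_cons]

-- no '/' occurs inside a segment
lemma no_slash_in_splitOn (M : List Char) : ∀ t ∈ M.splitOn '/', '/' ∉ t := by
  induction M with
  | nil => simp [List.splitOn, List.splitOnP_nil]
  | cons c r ih =>
    intro t ht
    rw [splitOn_cons] at ht
    by_cases h : c = '/'
    · simp [h] at ht
      rcases ht with h1 | h1
      · simp [h1]
      · exact ih t h1
    · rw [if_neg h] at ht
      cases hs : r.splitOn '/' with
      | nil => exact absurd hs (splitOn_ne_nil r)
      | cons s0 tl =>
        rw [hs] at ht
        simp [List.modifyHead] at ht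
        rcases ht with h1 | h1
        · subst h1
          intro hmem
          rcases List.mem_cons.mp hmem with h2 | h2
          · exact h h2.symm
          · exact ih s0 (hs ▸ List.mem_cons_self) h2
        · exact ih t (hs ▸ List.mem_cons_of_mem _ h1)

lemma pvF_ne_nil (M : List Char) (hne : M ≠ []) (hlast : M.getLast? ≠ some '/') : pvF M ≠ [] := by
  induction M with
  | nil => exact absurd rfl hne
  | cons c r ih =>
    by_cases h : c = '/'
    · subst h
      cases r with
      | nil => simp at hlast
      | cons d t =>
        rw [pvF_cons_slash]
        exact ih (by simp) (by rwa [List.getLast?_cons_cons] at hlast)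
    · intro hF
      unfold pvF at hF
      rw [splitOn_cons, if_neg h] at hF
      cases hs : r.splitOn '/' with
      | nil => exact absurd hs (splitOn_ne_nil r)
      | cons s0 tl => rw [hs] at hF; simp at hF

-- how the join of the nonempty segments unfolds across a non-slash head
lemma join_pvF_cons (c : Char) (r : List Char) (hc : c ≠ '/')
    (hlast : r ≠ [] → r.getLast? ≠ some '/') :
    PySem.Chars.join ['/'] (pvF (c :: r))
      = c :: ((if r.head? = some '/' then ['/'] else []) ++ PySem.Chars.join ['/'] (pvF r)) := by
  cases r with
  | nil => simp [pvF, hc, List.splitOn, List.splitOnP_nil, PySem.Chars.join, List.intercalate]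
  | cons d t =>
    by_cases hd : d = '/'
    · subst hd
      have hFr : pvF ('/' :: t) ≠ [] := by
        rw [pvF_cons_slash]
        cases t with
        | nil => exact absurd ((by simp : ('/' :: ([] : List Char)).getLast? = some '/')) (hlast (by simp))
        | cons e u =>
          exact pvF_ne_nil _ (by simp) (by have := hlast (by simp); rwa [List.getLast?_cons_cons] at this)
      have h1 : pvF (c :: '/' :: t) = [c] :: pvF ('/' :: t) := by
        unfold pvF
        rw [splitOn_cons, if_neg hc, splitOn_cons, if_pos rfl]
        simp [List.modifyHead]
      rw [h1]
      cases hFr' : pvF ('/' :: t) with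
      | nil => exact absurd hFr' hFr
      | cons y ys =>
        rw [PySem.Chars.join_cons_cons]
        simp
    · -- head of r is not a slash
      have h1 : ∃ s0 tl, (d :: t).splitOn '/' = (d :: s0) :: tl := by
        rw [splitOn_cons, if_neg hd]
        cases hs : t.splitOn '/' with
        | nil => exact absurd hs (splitOn_ne_nil t)
        | cons s0 tl => exact ⟨s0, tl, by simp [List.modifyHead]⟩
      obtain ⟨s0, tl, h1⟩ := h1
      have h2 : pvF (c :: d :: t) = (c :: d :: s0) :: tl.filter (fun t => t ≠ []) := by
        unfold pvF
        rw [splitOn_cons, if_neg hc, h1]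
        simp [List.modifyHead]
      have h3 : pvF (d :: t) = (d :: s0) :: tl.filter (fun t => t ≠ []) := by
        unfold pvF
        rw [h1]
        simp
      rw [h2, h3]
      cases htl : tl.filter (fun t => t ≠ []) with
      | nil => simp [hd, PySem.Chars.join_singleton]
      | cons y ys => rw [PySem.Chars.join_cons_cons, PySem.Chars.join_cons_cons]; simp [hd]

-- the collapse loop on a string with no trailing slash computes the join of its nonempty
-- segments, plus one leading '/' (in the false-state) if the string starts with one
lemma pvG_spec (M : List Char) (hlast : M.getLast? ≠ some '/') :
    pvG true M = PySem.Chars.join ['/'] (pvF M) ∧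
    pvG false M = (if M.head? = some '/' then ['/'] else []) ++ PySem.Chars.join ['/'] (pvF M) := by
  induction M with
  | nil => simp [pvG, pvF, List.splitOn, List.splitOnP_nil, PySem.Chars.join, List.intercalate]
  | cons c r ih =>
    have hlr : r ≠ [] → r.getLast? ≠ some '/' := by
      intro hr
      cases r with
      | nil => exact absurd rfl hr
      | cons d t => rwa [List.getLast?_cons_cons] at hlast
    by_cases h : c = '/'
    · subst h
      have hr : r ≠ [] := by intro h; subst h; simp at hlast
      obtain ⟨ih1, _⟩ := ih (hlr hr)
      have hFne : pvF r ≠ [] := pvF_ne_nil r hr (hlr hr)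
      constructor
      · rw [pvF_cons_slash]
        show pvG true ('/' :: r) = _
        rw [pvG]; simp [ih1]
      · rw [pvF_cons_slash]
        show pvG false ('/' :: r) = _
        rw [pvG]; simp [ih1]
    · -- c ≠ '/' : both states emit c and continue in the false state
      have hstep : ∀ b, pvG b (c :: r) = c :: pvG false r := by
        intro b
        rw [pvG]
        have : (c == '/') = false := by simp [h]
        rw [if_neg (by simp [h]), this]
      have ih2 : pvG false r = (if r.head? = some '/' then ['/'] else []) ++ PySem.Chars.join ['/'] (pvF r) := by
        cases r with
        | nil => simp [pvG, pvF, List.splitOn, List.splitOnP_nil, PySem.Chars.join, List.intercalate]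
        | cons d t => exact (ih (hlr (by simp))).2
      have hj := join_pvF_cons c r h hlr
      constructor
      · rw [hstep, ih2, hj]
      · rw [hstep, ih2, hj]
        simp [h]

-- the trailing-strip loop: decomposition and its two consequences
lemma pvStripTrail_decomp (l : List Char) : ∃ k, l = pvStripTrail l ++ List.replicate k '/' := by
  fun_induction pvStripTrail l with
  | case1 l h ih =>
    obtain ⟨k, hk⟩ := ih
    refine ⟨k + 1, ?_⟩
    rw [List.replicate_succ', ← List.append_assoc, ← hk]
    conv_lhs => rw [← List.dropLast_append_getLast? (a := '/') h.2]
  | case2 l h => exact ⟨0, by simp⟩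

lemma pvStripTrail_last (l : List Char) : (pvStripTrail l).getLast? ≠ some '/' := by
  fun_induction pvStripTrail l with
  | case1 l h ih => exact ih
  | case2 l h =>
    intro hc
    have hne : l ≠ [] := by intro hl; subst hl; simp at hc
    exact h ⟨by cases l with | nil => exact absurd rfl hne | cons a r => simp, hc⟩

lemma pvStripTrail_prefix (l : List Char) : pvStripTrail l <+: l := by
  obtain ⟨k, hk⟩ := pvStripTrail_decomp l
  exact ⟨List.replicate k '/', hk.symm⟩

lemma splitOn_append_slash (xs : List Char) :
    (xs ++ ['/']).splitOn '/' = xs.splitOn '/' ++ [[]] := by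
  induction xs with
  | nil => simp [List.splitOn, List.splitOnP_nil, List.splitOnP_cons]
  | cons c r ih =>
    rw [List.cons_append, splitOn_cons, splitOn_cons, ih]
    by_cases h : c = '/'
    · simp [h]
    · rw [if_neg h, if_neg h]
      cases hs : r.splitOn '/' with
      | nil => exact absurd hs (splitOn_ne_nil r)
      | cons s0 tl => simp [List.modifyHead]

lemma pvF_append_replicate (X : List Char) (k : Nat) : pvF (X ++ List.replicate k '/') = pvF X := by
  induction k with
  | zero => simp
  | succ n ihn =>
    rw [List.replicate_succ', ← List.append_assoc]
    unfold pvF at ihn ⊢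
    rw [splitOn_append_slash, List.filter_append]
    simpa using ihn

lemma pvF_stripTrail (l : List Char) : pvF (pvStripTrail l) = pvF l := by
  obtain ⟨k, hk⟩ := pvStripTrail_decomp l
  conv_rhs => rw [hk]
  rw [pvF_append_replicate]

-- main: A's strip/strip/collapse pipeline computes the join of the nonempty segments
lemma pvMain (L : List Char) :
    ((pvStripTrail (pvStripLead L)).foldl pvCollapseStep ((none : Option Char), ([] : List Char))).2
      = PySem.Chars.join ['/'] (pvF L) := by
  induction L with
  | nil =>
    rw [pvStripLead, pvStripTrail]
    simp [pvF, List.splitOn, List.splitOnP_nil, PySem.Chars.join, List.intercalate]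
  | cons c r ih =>
    by_cases h : c = '/'
    · subst h
      rw [pvF_cons_slash, ← ih]
      rw [pvStripLead, if_pos rfl]
    · have hlead : pvStripLead (c :: r) = c :: r := by rw [pvStripLead, if_neg h]
      rw [hlead, pvFoldl_collapse]
      show pvG false (pvStripTrail (c :: r)) = _
      have hlast := pvStripTrail_last (c :: r)
      have hspec := (pvG_spec _ hlast).2
      have hhead : (if (pvStripTrail (c :: r)).head? = some '/' then (['/'] : List Char) else []) = [] := by
        cases hst : pvStripTrail (c :: r) with
        | nil => simp
        | cons a t =>
          have hpre := pvStripTrail_prefix (c :: r)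
          rw [hst] at hpre
          obtain ⟨u, hu⟩ := hpre
          have : a = c := by
            have := congrArg List.head? hu
            simpa using this
          subst this
          simp [h]
      rw [hspec, hhead, List.nil_append, pvF_stripTrail]

-- ===== VERDICT (by name: the statement is the Claim_ definition above) =====
theorem normalize_storage_path_spec : Claim_equal_normalize_storage_path := by
  unfold Claim_equal_normalize_storage_path
  intro path _ hpre
  unfold Spec_normalize_storage_path
  cases path with
  | none => rfl
  | some s =>
    simp only [normalize_storage_path, normalize_storage_path_alt]
    by_cases hs : s.toList = []
    · simp [hs]
    · rw [if_neg hs, if_neg hs]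
      set L := PySem.Chars.replace s.toList ['\\'] ['/'] with hL
      have hcol := pvMain L
      have hpreL : ∀ t ∈ L.splitOn '/', t ≠ ['.'] ∧ t ≠ ['.', '.'] := by
        unfold Pre_normalize_storage_path at hpre
        exact hpre
      have hFsub : ∀ t ∈ pvF L, t ≠ ['.'] ∧ t ≠ ['.', '.'] := by
        intro t ht
        exact hpreL t (List.mem_of_mem_filter ht)
      have hBguard : ((L.splitOn '/').filter (fun t => t ≠ [])).any (fun t => t = ['.'] || t = ['.', '.']) = false := by
        rw [List.any_eq_false]
        intro t ht
        obtain ⟨h1, h2⟩ := hFsub t ht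
        simp [h1, h2]
      have hAguard : ((PySem.Chars.join ['/'] (pvF L)).splitOn '/').any (fun t => t = ['.'] || t = ['.', '.']) = false := by
        cases hF : pvF L with
        | nil => simp [PySem.Chars.join, List.intercalate, List.splitOn, List.splitOnP_nil]
        | cons y ys =>
          have hsegs : (PySem.Chars.join ['/'] (pvF L)).splitOn '/' = pvF L := by
            show List.splitOn '/' (['/'].intercalate (pvF L)) = pvF L
            refine List.splitOn_intercalate (pvF L) '/' ?_ (by rw [hF]; simp)
            intro l hl
            exact no_slash_in_splitOn L l (List.mem_of_mem_filter hl)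
          rw [List.any_eq_false] at hBguard ⊢
          intro t ht
          rw [← hF, hsegs] at ht
          exact hBguard t ht
      simp only [hcol, hAguard, hBguard]
      simp only [Bool.false_eq_true, if_false]
      rfl
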